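-- pv_equiv track=rewrite | github.com/markjayson13/IPEDSDB_Panel | Scripts/wide_build_common.py | order_targets
-- ===== SOURCE A (Python) =====
-- from typing import Iterable
--
-- def order_targets(targets: Iterable[str]) -> list[str]:
--     target_set = set(targets)
--     non_x = sorted([t for t in target_set if not t.startswith("X")])
--     ordered: list[str] = []
--     for base in non_x:
--         ordered.append(base)
--         xvar = f"X{base}"
--         if xvar in target_set:
--             ordered.append(xvar)
--     remaining = sorted([t for t in target_set if t not in ordered])
--     ordered.extend(remaining)
--     return ordered
-- ===== SOURCE B (Python) =====
-- def order_targets(targets):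
--     tset = set(targets)
--     def keyfn(t):
--         if not t.startswith("X"):
--             return (0, (t, 0))
--         base = t[1:]
--         if base in tset and not base.startswith("X"):
--             return (0, (base, 1))
--         return (1, (t, 0))
--     return sorted(tset, key=keyfn)
-- ===== Notes on version B (the rewrite author's own statement) =====
-- stated objective: faster
-- what changed: Replaces A's two sorts plus interleave loop and per-element 'not in ordered' list rescan with a single keyed sort over the deduplicated targets, using a composite key that places each X-variant right after its base and unmatched X-strings in a sorted tail.
import Mathlib
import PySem

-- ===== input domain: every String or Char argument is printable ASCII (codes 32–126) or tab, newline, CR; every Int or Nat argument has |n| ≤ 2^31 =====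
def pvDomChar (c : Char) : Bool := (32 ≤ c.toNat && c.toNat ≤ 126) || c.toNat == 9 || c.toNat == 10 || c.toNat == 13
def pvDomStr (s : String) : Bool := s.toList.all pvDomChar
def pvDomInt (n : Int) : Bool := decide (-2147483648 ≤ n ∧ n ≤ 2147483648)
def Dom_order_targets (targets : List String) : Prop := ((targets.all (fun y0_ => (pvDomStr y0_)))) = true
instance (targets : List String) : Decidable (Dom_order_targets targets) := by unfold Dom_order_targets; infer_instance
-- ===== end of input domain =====

-- B replaces A's two sorts + interleave loop + quadratic list-membership rescan by one
-- composite-key sort over the deduplicated targets (objective: faster, measured).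


-- ===== PORT A =====
def order_targets (targets : List String) : List String :=
  let target_set := PySem.Set.ofList targets
  let non_x := PySem.List.sorted (target_set.filter (fun t => !(PySem.Str.startswith t "X"))) (fun t => t) false
  let ordered := non_x.foldl (fun ordered base =>
      let ordered := ordered ++ [base]
      let xvar := "X" ++ base
      if PySem.Set.contains target_set xvar then ordered ++ [xvar] else ordered) ([] : List String)
  let remaining := PySem.List.sorted (target_set.filter (fun t => !(ordered.contains t))) (fun t => t) false
  ordered ++ remaining

-- ===== PORT B =====
-- Source B's keyfn returns the Python tuple (g, (s, r)); a tuple-keyed sorted(...) is ported as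
-- PySem.List.sorted2 with the two tuple components (the inner pair as a Lex pair).
def order_targets_alt (targets : List String) : List String :=
  let tset := PySem.Set.ofList targets
  let k1 : String → Int := fun t =>
    if !(PySem.Str.startswith t "X") then 0
    else if PySem.Set.contains tset (PySem.Str.slice t (some 1) none) &&
            !(PySem.Str.startswith (PySem.Str.slice t (some 1) none) "X") then 0
    else 1
  let k2 : String → String ×ₗ Int := fun t =>
    if !(PySem.Str.startswith t "X") then toLex (t, 0)
    else
      let base := PySem.Str.slice t (some 1) none
      if PySem.Set.contains tset base && !(PySem.Str.startswith base "X") then toLex (base, 1)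
      else toLex (t, 0)
  PySem.List.sorted2 tset k1 k2 false

-- ===== PRECONDITION & SPEC =====
def Spec_order_targets (targets : List String) (out : List String) : Prop := out = order_targets_alt targets
instance (targets : List String) (out : List String) : Decidable (Spec_order_targets targets out) := by unfold Spec_order_targets; infer_instance

-- ===== CLAIM (what is proved, stated in full; the proofs are below) =====
def Claim_equal_order_targets : Prop := ∀ (targets : List String), Dom_order_targets targets → Spec_order_targets targets (order_targets targets)

-- ===== LEMMAS AND PROOFS =====

-- B's composite key as one Lex-valued function
def pvKey (S : List String) (t : String) : Int ×ₗ (String ×ₗ Int) :=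
  if !(PySem.Str.startswith t "X") then toLex (0, toLex (t, 0))
  else if PySem.Set.contains S (PySem.Str.slice t (some 1) none) &&
          !(PySem.Str.startswith (PySem.Str.slice t (some 1) none) "X") then
    toLex (0, toLex (PySem.Str.slice t (some 1) none, 1))
  else toLex (1, toLex (t, 0))

-- the per-base group A's interleave loop appends, and A's intermediate lists
def pvG (S : List String) (b : String) : List String :=
  if PySem.Set.contains S ("X" ++ b) then [b, "X" ++ b] else [b]

def pvNonX (S : List String) : List String :=
  PySem.List.sorted (S.filter (fun t => !(PySem.Str.startswith t "X"))) (fun t => t) false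

def pvOrdered (S : List String) : List String := (pvNonX S).flatMap (pvG S)

theorem sorted2_eq_sorted_toLex {α κ₁ κ₂ : Type} [LinearOrder κ₁] [LinearOrder κ₂]
    (xs : List α) (k1 : α → κ₁) (k2 : α → κ₂) :
    PySem.List.sorted2 xs k1 k2 false = PySem.List.sorted xs (fun x => toLex (k1 x, k2 x)) false := by
  unfold PySem.List.sorted2 PySem.List.sorted
  simp only [if_neg (by decide : ¬ (false = true))]
  congr 1
  funext acc x
  congr 1
  funext a b
  rw [Bool.eq_iff_iff]
  simp only [Bool.or_eq_true, Bool.and_eq_true, Bool.not_eq_true', decide_eq_true_eq,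
    decide_eq_false_iff_not, Prod.Lex.lt_iff, ofLex_toLex]
  constructor
  · rintro (h | ⟨h1, h2⟩)
    · exact Or.inl h
    · by_cases hlt : k1 a < k1 b
      · exact Or.inl hlt
      · exact Or.inr ⟨le_antisymm (not_lt.mp h1) (not_lt.mp hlt), h2⟩
  · rintro (h | ⟨h1, h2⟩)
    · exact Or.inl h
    · exact Or.inr ⟨by rw [h1]; exact lt_irrefl _, h2⟩

theorem sw_X_append (b : String) : PySem.Str.startswith ("X" ++ b) "X" = true := by
  rw [PySem.Str.startswith_eq, PySem.Chars.startswith_iff, String.toList_append]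
  exact List.prefix_append _ _

theorem slice_X_append (b : String) : PySem.Str.slice ("X" ++ b) (some 1) none = b := by
  show String.ofList _ = b
  rw [PySem.Chars.slice_eq_listSlice, PySem.List.slice_from_one, String.toList_append]
  show String.ofList (('X' :: []) ++ b.toList).tail = b
  simp [String.ofList_toList]

theorem eq_X_append {t : String} (h : PySem.Str.startswith t "X" = true) :
    t = "X" ++ PySem.Str.slice t (some 1) none := by
  rw [PySem.Str.startswith_eq, PySem.Chars.startswith_iff] at h
  obtain ⟨r, hr⟩ := h
  have : t = "X" ++ String.ofList r := by
    apply String.toList_injective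
    rw [String.toList_append, ← hr]
    simp [String.toList_ofList]
  rw [this, slice_X_append]

theorem alt_eq_sorted_key (targets : List String) :
    order_targets_alt targets =
      PySem.List.sorted (PySem.Set.ofList targets) (pvKey (PySem.Set.ofList targets)) false := by
  show PySem.List.sorted2 _ _ _ false = _
  rw [sorted2_eq_sorted_toLex]
  congr 1
  funext t
  unfold pvKey
  split_ifs with h1 h2
  · rfl
  · rw [if_pos h2]
  · rw [if_neg h2]

theorem foldl_eq_ordered (S l : List String) :
    l.foldl (fun ordered base =>
      let ordered := ordered ++ [base]
      let xvar := "X" ++ base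
      if PySem.Set.contains S xvar then ordered ++ [xvar] else ordered) [] = l.flatMap (pvG S) := by
  have h : (fun (ordered : List String) (base : String) =>
      let ordered := ordered ++ [base]
      let xvar := "X" ++ base
      if PySem.Set.contains S xvar then ordered ++ [xvar] else ordered)
      = fun acc b => acc ++ pvG S b := by
    funext acc b
    show (if PySem.Set.contains S ("X" ++ b) then (acc ++ [b]) ++ ["X" ++ b] else acc ++ [b]) = _
    unfold pvG
    split_ifs <;> simp
  rw [h, PySem.List.foldl_append_eq_flatMap]
  rfl

theorem orderA_eq (targets : List String) :
    order_targets targets =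
      pvOrdered (PySem.Set.ofList targets) ++
        PySem.List.sorted ((PySem.Set.ofList targets).filter
          (fun t => !((pvOrdered (PySem.Set.ofList targets)).contains t))) (fun t => t) false := by
  simp only [order_targets]
  rw [foldl_eq_ordered]
  rfl

theorem mem_nonx {S : List String} {t : String} :
    t ∈ pvNonX S ↔ t ∈ S ∧ PySem.Str.startswith t "X" = false := by
  unfold pvNonX
  rw [PySem.List.mem_sorted, List.mem_filter]
  simp

theorem mem_ordered_of_mem_g {S : List String} {b x : String}
    (hb : b ∈ pvNonX S) (hx : x ∈ pvG S b) : x ∈ pvOrdered S :=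
  List.mem_flatMap.mpr ⟨b, hb, hx⟩

theorem mem_g_sub {S : List String} {b x : String} (hx : x ∈ pvG S b) :
    x = b ∨ (x = "X" ++ b ∧ ("X" ++ b) ∈ S) := by
  unfold pvG at hx
  split_ifs at hx with h
  · simp only [List.mem_cons, List.not_mem_nil, or_false] at hx
    rcases hx with h1 | h1
    · exact Or.inl h1
    · exact Or.inr ⟨h1, List.contains_iff_mem.mp h⟩
  · simp only [List.mem_cons, List.not_mem_nil, or_false] at hx
    exact Or.inl hx

-- key values
theorem key_nonx {S : List String} {t : String} (h : PySem.Str.startswith t "X" = false) :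
    pvKey S t = toLex (0, toLex (t, 0)) := by
  unfold pvKey; rw [if_pos (by rw [h]; rfl)]

theorem key_var {S : List String} {b : String} (hbS : b ∈ S)
    (hbX : PySem.Str.startswith b "X" = false) :
    pvKey S ("X" ++ b) = toLex (0, toLex (b, 1)) := by
  unfold pvKey
  rw [if_neg (by rw [sw_X_append]; decide), slice_X_append,
    if_pos (by rw [show PySem.Set.contains S b = true from List.contains_iff_mem.mpr hbS, hbX]; rfl)]

theorem key_of_mem_g {S : List String} {b x : String}
    (hbS : b ∈ S) (hbX : PySem.Str.startswith b "X" = false) (hx : x ∈ pvG S b) :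
    pvKey S x = toLex (0, toLex (b, 0)) ∨ pvKey S x = toLex (0, toLex (b, 1)) := by
  rcases mem_g_sub hx with rfl | ⟨rfl, _⟩
  · exact Or.inl (key_nonx hbX)
  · exact Or.inr (key_var hbS hbX)

theorem key_of_rem {S : List String} {t : String} (ht : t ∈ S) (hno : t ∉ pvOrdered S) :
    pvKey S t = toLex (1, toLex (t, 0)) := by
  by_cases h1 : PySem.Str.startswith t "X"
  · by_cases h2 : PySem.Set.contains S (PySem.Str.slice t (some 1) none) &&
        !(PySem.Str.startswith (PySem.Str.slice t (some 1) none) "X")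
    · exfalso
      apply hno
      have hb : PySem.Str.slice t (some 1) none ∈ S ∧
          PySem.Str.startswith (PySem.Str.slice t (some 1) none) "X" = false := by
        rcases Bool.and_eq_true_iff.mp h2 with ⟨ha, hbb⟩
        exact ⟨List.contains_iff_mem.mp ha, by simpa using hbb⟩
      apply mem_ordered_of_mem_g (mem_nonx.mpr hb)
      have hXb : "X" ++ PySem.Str.slice t (some 1) none = t := (eq_X_append h1).symm
      unfold pvG
      rw [hXb, show PySem.Set.contains S t = true from List.contains_iff_mem.mpr ht]
      simp
    · unfold pvKey
      rw [if_neg (by rw [h1]; decide), if_neg h2]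
  · exfalso
    exact hno (mem_ordered_of_mem_g (mem_nonx.mpr ⟨ht, by simpa using h1⟩)
      (by unfold pvG; split_ifs <;> simp))

theorem key_lt_of_base_lt {b b' : String} {i j : Int} (h : b < b') :
    toLex ((0:Int), toLex (b, i)) < toLex ((0:Int), toLex (b', j)) := by
  rw [Prod.Lex.lt_iff]
  exact Or.inr ⟨rfl, by rw [Prod.Lex.lt_iff]; exact Or.inl h⟩

theorem flatMap_pairwise (S : List String) (l : List String)
    (hmem : ∀ b ∈ l, b ∈ S ∧ PySem.Str.startswith b "X" = false)
    (hp : l.Pairwise (· < ·)) :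
    (l.flatMap (pvG S)).Pairwise (fun a b => pvKey S a < pvKey S b) := by
  induction l with
  | nil => simp
  | cons b l ih =>
    rw [List.flatMap_cons, List.pairwise_append]
    obtain ⟨hbS, hbX⟩ := hmem b (List.mem_cons_self ..)
    refine ⟨?_, ih (fun b' hb' => hmem b' (List.mem_cons_of_mem _ hb')) (List.Pairwise.of_cons hp), ?_⟩
    · unfold pvG
      split_ifs with hc
      · refine List.pairwise_cons.mpr ⟨?_, by simp⟩
        intro y hy
        rw [List.mem_singleton] at hy
        subst hy
        rw [key_nonx hbX, key_var hbS hbX, Prod.Lex.lt_iff]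
        exact Or.inr ⟨rfl, by rw [Prod.Lex.lt_iff]; exact Or.inr ⟨rfl, by norm_num⟩⟩
      · simp
    · intro x hx y hy
      obtain ⟨b', hb', hyg⟩ := List.mem_flatMap.mp hy
      obtain ⟨hb'S, hb'X⟩ := hmem b' (List.mem_cons_of_mem _ hb')
      have hlt : b < b' := (List.pairwise_cons.mp hp).1 b' hb'
      rcases key_of_mem_g hbS hbX hx with h | h <;>
        rcases key_of_mem_g hb'S hb'X hyg with h' | h' <;>
        rw [h, h'] <;> exact key_lt_of_base_lt hlt

theorem nonx_pairwise_lt {S : List String} (hS : S.Nodup) : (pvNonX S).Pairwise (· < ·) := by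
  unfold pvNonX
  have hle := PySem.List.sorted_pairwise (S.filter (fun t => !(PySem.Str.startswith t "X"))) (fun t => t)
  have hnd := (PySem.List.sorted_perm (S.filter (fun t => !(PySem.Str.startswith t "X"))) (fun t => t) false).symm.nodup (hS.filter _)
  exact (hle.and hnd).imp (fun h => lt_of_le_of_ne h.1 h.2)

theorem ordered_pairwise {S : List String} (hS : S.Nodup) :
    (pvOrdered S).Pairwise (fun a b => pvKey S a < pvKey S b) :=
  flatMap_pairwise S (pvNonX S) (fun _ hb => mem_nonx.mp hb) (nonx_pairwise_lt hS)

theorem mem_rem {S : List String} {t : String} :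
    t ∈ PySem.List.sorted (S.filter (fun t => !((pvOrdered S).contains t))) (fun t => t) false ↔
      t ∈ S ∧ t ∉ pvOrdered S := by
  rw [PySem.List.mem_sorted, List.mem_filter]
  simp

theorem rem_pairwise_lt {S : List String} (hS : S.Nodup) :
    (PySem.List.sorted (S.filter (fun t => !((pvOrdered S).contains t))) (fun t => t) false).Pairwise (· < ·) := by
  have hle := PySem.List.sorted_pairwise (S.filter (fun t => !((pvOrdered S).contains t))) (fun t => t)
  have hnd := (PySem.List.sorted_perm (S.filter (fun t => !((pvOrdered S).contains t))) (fun t => t) false).symm.nodup (hS.filter _)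
  exact (hle.and hnd).imp (fun h => lt_of_le_of_ne h.1 h.2)

theorem key_fst_zero_of_mem_ordered {S : List String} {x : String} (hx : x ∈ pvOrdered S) :
    ∃ b i, pvKey S x = toLex (0, toLex (b, i)) := by
  obtain ⟨b, hb, hxg⟩ := List.mem_flatMap.mp hx
  obtain ⟨hbS, hbX⟩ := mem_nonx.mp hb
  rcases key_of_mem_g hbS hbX hxg with h | h
  · exact ⟨b, 0, h⟩
  · exact ⟨b, 1, h⟩

theorem out_pairwise {S : List String} (hS : S.Nodup) :
    (pvOrdered S ++
      PySem.List.sorted (S.filter (fun t => !((pvOrdered S).contains t))) (fun t => t) false).Pairwise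
      (fun a b => pvKey S a < pvKey S b) := by
  rw [List.pairwise_append]
  refine ⟨ordered_pairwise hS, ?_, ?_⟩
  · refine (rem_pairwise_lt hS).imp_of_mem ?_
    intro a b ha hb hab
    obtain ⟨haS, hano⟩ := mem_rem.mp ha
    obtain ⟨hbS, hbno⟩ := mem_rem.mp hb
    rw [key_of_rem haS hano, key_of_rem hbS hbno, Prod.Lex.lt_iff]
    exact Or.inr ⟨rfl, by rw [Prod.Lex.lt_iff]; exact Or.inl hab⟩
  · intro x hx y hy
    obtain ⟨b, i, hk⟩ := key_fst_zero_of_mem_ordered hx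
    obtain ⟨hyS, hyno⟩ := mem_rem.mp hy
    rw [hk, key_of_rem hyS hyno, Prod.Lex.lt_iff]
    exact Or.inl (by norm_num)

theorem ordered_subset {S : List String} {x : String} (hx : x ∈ pvOrdered S) : x ∈ S := by
  obtain ⟨b, hb, hxg⟩ := List.mem_flatMap.mp hx
  obtain ⟨hbS, _⟩ := mem_nonx.mp hb
  rcases mem_g_sub hxg with rfl | ⟨rfl, hv⟩
  · exact hbS
  · exact hv

theorem out_perm {S : List String} (hS : S.Nodup) :
    (pvOrdered S ++
      PySem.List.sorted (S.filter (fun t => !((pvOrdered S).contains t))) (fun t => t) false).Perm S := by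
  have hnd_ord : (pvOrdered S).Nodup :=
    (ordered_pairwise hS).imp (fun h => by rintro rfl; exact lt_irrefl _ h)
  have h1 : (pvOrdered S).Perm (S.filter (fun t => (pvOrdered S).contains t)) := by
    rw [List.perm_ext_iff_of_nodup hnd_ord (hS.filter _)]
    intro a
    rw [List.mem_filter, List.contains_iff_mem]
    exact ⟨fun h => ⟨ordered_subset h, h⟩, fun h => h.2⟩
  have h2 := PySem.List.sorted_perm (S.filter (fun t => !((pvOrdered S).contains t))) (fun t => t) false
  exact (h1.append h2).trans (List.filter_append_perm _ S)

-- ===== VERDICT (by name: the statement is the Claim_ definition above) =====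
theorem order_targets_spec : Claim_equal_order_targets := by
  intro targets _
  unfold Spec_order_targets
  rw [orderA_eq, alt_eq_sorted_key]
  exact (PySem.List.sorted_eq_of_perm_of_pairwise_lt _ _ _
    (out_perm (PySem.Set.nodup_ofList targets))
    (out_pairwise (PySem.Set.nodup_ofList targets))).symm
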